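-- pv_equiv track=rewrite | github.com/veddahit/Soft_assignment | qn2_2nd_task.py | separate_and_convert
-- ===== SOURCE A (Python) =====
-- def separate_and_convert(s):
--     number_string = ''.join(c for c in s if c.isdigit())
--     letter_string = ''.join(c for c in s if c.isalpha())
--
--
--     even_numbers = [int(num) for num in number_string if int(num) % 2 == 0]
--     even_numbers_ascii = [ord(str(num)) for num in even_numbers]
--
--
--     upper_case_letters = [char for char in letter_string if char.isupper()]
--     upper_case_ascii = [ord(char) for char in upper_case_letters]
--
--     return ''.join(map(str, even_numbers_ascii)), ''.join(map(str, upper_case_ascii))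
-- ===== SOURCE B (Python) =====
-- def separate_and_convert(s):
--     # Single fused pass: two accumulators instead of A's build-then-rescan pipelines.
--     nums = []
--     lets = []
--     for c in s:
--         if c.isdigit():
--             if int(c) % 2 == 0:
--                 nums.append(str(ord(c)))
--         elif c.isupper():
--             lets.append(str(ord(c)))
--     return ''.join(nums), ''.join(lets)
-- ===== Notes on version B (the rewrite author's own statement) =====
-- stated objective: simpler
-- what changed: A builds a digit string and a letter string, then rescans them through four intermediate list comprehensions; B is one fused loop over s with two accumulators that classifies each character once.
import Mathlib
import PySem

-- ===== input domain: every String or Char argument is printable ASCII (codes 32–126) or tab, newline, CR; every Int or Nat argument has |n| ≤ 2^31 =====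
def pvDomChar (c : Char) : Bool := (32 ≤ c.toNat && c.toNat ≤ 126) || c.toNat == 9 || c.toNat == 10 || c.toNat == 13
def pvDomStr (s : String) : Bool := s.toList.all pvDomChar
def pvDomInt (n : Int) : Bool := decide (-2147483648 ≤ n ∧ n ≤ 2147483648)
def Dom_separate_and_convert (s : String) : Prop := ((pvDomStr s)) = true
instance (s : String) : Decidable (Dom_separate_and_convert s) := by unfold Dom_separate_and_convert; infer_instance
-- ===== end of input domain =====

-- B fuses A's build-then-rescan pipelines (filter/map chains) into one pass with two accumulators; objective: simpler single traversal, same cost class.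


-- ===== PORT A =====
-- int(num) for a digit char: PySem.Int.ofChars? [c]; getD 0 is unreachable for chars isdigit accepts.
-- ord(str(num)): str(num) of a digit value is one char; the `_ => 0` arm is unreachable there.
-- ''.join(map(str, xs)) = concatenation of the decimal strings (flatten of toChars).
def separate_and_convert (s : String) : String × String :=
  let cs := s.toList
  let number_string := cs.filter PySem.Chars.isdigit
  let letter_string := cs.filter PySem.Chars.isalpha
  let even_numbers := (number_string.filter
      (fun c => PySem.Int.mod ((PySem.Int.ofChars? [c]).getD 0) 2 == 0)).map
      (fun c => (PySem.Int.ofChars? [c]).getD 0)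
  let even_numbers_ascii := even_numbers.map
      (fun n => match PySem.Int.toChars n with | [d] => (d.toNat : Int) | _ => 0)
  let upper_case_letters := letter_string.filter PySem.Chars.isupper
  let upper_case_ascii := upper_case_letters.map (fun c => (c.toNat : Int))
  (String.ofList ((even_numbers_ascii.map PySem.Int.toChars).flatten),
   String.ofList ((upper_case_ascii.map PySem.Int.toChars).flatten))

-- ===== PORT B =====
-- one fold over the characters, two accumulators (Source B's single loop)
def separate_and_convert_alt (s : String) : String × String :=
  let p := s.toList.foldl
    (fun (acc : List Char × List Char) c =>
      if PySem.Chars.isdigit c then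
        if PySem.Int.mod ((PySem.Int.ofChars? [c]).getD 0) 2 == 0 then
          (acc.1 ++ PySem.Int.toChars (c.toNat : Int), acc.2)
        else acc
      else if PySem.Chars.isupper c then
        (acc.1, acc.2 ++ PySem.Int.toChars (c.toNat : Int))
      else acc)
    ([], [])
  (String.ofList p.1, String.ofList p.2)

-- ===== PRECONDITION & SPEC =====
def Spec_separate_and_convert (s : String) (out : String × String) : Prop := out = separate_and_convert_alt s
instance (s : String) (out : String × String) : Decidable (Spec_separate_and_convert s out) := by unfold Spec_separate_and_convert; infer_instance

-- ===== CLAIM (what is proved, stated in full; the proofs are below) =====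
def Claim_equal_separate_and_convert : Prop := ∀ (s : String), Dom_separate_and_convert s → Spec_separate_and_convert s (separate_and_convert s)

-- ===== LEMMAS AND PROOFS =====

-- every char isdigit accepts is one of the ten ASCII digits
lemma pvDigitEnum (c : Char) (h : PySem.Chars.isdigit c = true) :
    c = '0' ∨ c = '1' ∨ c = '2' ∨ c = '3' ∨ c = '4' ∨ c = '5' ∨ c = '6' ∨ c = '7' ∨ c = '8' ∨ c = '9' := by
  have hc : c = Char.ofNat c.toNat := (Char.ofNat_toNat c).symm
  have hb : 48 ≤ c.toNat ∧ c.toNat ≤ 57 := by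
    rw [PySem.Chars.isdigit, Bool.and_eq_true, decide_eq_true_iff, decide_eq_true_iff,
      Char.le_def, Char.le_def, UInt32.le_iff_toNat_le, UInt32.le_iff_toNat_le] at h
    have h0 : ('0' : Char).val.toNat = 48 := by decide
    have h9 : ('9' : Char).val.toNat = 57 := by decide
    have hcn : c.toNat = c.val.toNat := rfl
    omega
  have h' : c.toNat = 48 ∨ c.toNat = 49 ∨ c.toNat = 50 ∨ c.toNat = 51 ∨ c.toNat = 52 ∨
      c.toNat = 53 ∨ c.toNat = 54 ∨ c.toNat = 55 ∨ c.toNat = 56 ∨ c.toNat = 57 := by omega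
  rcases h' with h'|h'|h'|h'|h'|h'|h'|h'|h'|h' <;> rw [hc, h'] <;> decide

-- A's per-even-digit contribution ord(str(int(c))) equals B's ord(c)
lemma pvDigitOrd (c : Char) (h : PySem.Chars.isdigit c = true) :
    (match PySem.Int.toChars ((PySem.Int.ofChars? [c]).getD 0) with
      | [d] => (d.toNat : Int) | _ => 0) = (c.toNat : Int) := by
  rcases pvDigitEnum c h with h'|h'|h'|h'|h'|h'|h'|h'|h'|h' <;> subst h' <;> decide

lemma pvDigitNotUpper (c : Char) (h : PySem.Chars.isdigit c = true) :
    PySem.Chars.isupper c = false := by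
  rcases pvDigitEnum c h with h'|h'|h'|h'|h'|h'|h'|h'|h'|h' <;> subst h' <;> decide

-- A's first component as a list-of-chars function
def pvNum (cs : List Char) : List Char :=
  (((cs.filter PySem.Chars.isdigit).filter
      (fun c => PySem.Int.mod ((PySem.Int.ofChars? [c]).getD 0) 2 == 0)).map
    (fun c => PySem.Int.toChars
      (match PySem.Int.toChars ((PySem.Int.ofChars? [c]).getD 0) with
        | [d] => (d.toNat : Int) | _ => 0))).flatten

-- A's second component as a list-of-chars function
def pvLet (cs : List Char) : List Char :=
  (((cs.filter PySem.Chars.isalpha).filter PySem.Chars.isupper).map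
    (fun c => PySem.Int.toChars ((c.toNat : Int)))).flatten

lemma pvNum_cons_even (c : Char) (cs : List Char) (hd : PySem.Chars.isdigit c = true)
    (he : (PySem.Int.mod ((PySem.Int.ofChars? [c]).getD 0) 2 == 0) = true) :
    pvNum (c :: cs) = PySem.Int.toChars (c.toNat : Int) ++ pvNum cs := by
  unfold pvNum
  rw [List.filter_cons, if_pos hd, List.filter_cons, if_pos he, List.map_cons,
    List.flatten_cons, pvDigitOrd c hd]

lemma pvNum_cons_odd (c : Char) (cs : List Char) (hd : PySem.Chars.isdigit c = true)
    (he : ¬ (PySem.Int.mod ((PySem.Int.ofChars? [c]).getD 0) 2 == 0) = true) :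
    pvNum (c :: cs) = pvNum cs := by
  unfold pvNum
  rw [List.filter_cons, if_pos hd, List.filter_cons, if_neg he]

lemma pvNum_cons_nondigit (c : Char) (cs : List Char) (hd : PySem.Chars.isdigit c = false) :
    pvNum (c :: cs) = pvNum cs := by
  unfold pvNum
  rw [List.filter_cons, if_neg (by simp [hd])]

lemma pvLet_cons_upper (c : Char) (cs : List Char) (hu : PySem.Chars.isupper c = true) :
    pvLet (c :: cs) = PySem.Int.toChars (c.toNat : Int) ++ pvLet cs := by
  have ha : PySem.Chars.isalpha c = true := by simp [PySem.Chars.isalpha, hu]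
  unfold pvLet
  rw [List.filter_cons, if_pos ha, List.filter_cons, if_pos hu, List.map_cons, List.flatten_cons]

lemma pvLet_cons_nonupper (c : Char) (cs : List Char) (hu : PySem.Chars.isupper c = false) :
    pvLet (c :: cs) = pvLet cs := by
  unfold pvLet
  by_cases ha : PySem.Chars.isalpha c = true
  · rw [List.filter_cons, if_pos ha, List.filter_cons, if_neg (by simp [hu])]
  · rw [List.filter_cons, if_neg ha]

lemma pvLoopSpec (cs : List Char) (ns ls : List Char) :
    cs.foldl
      (fun (acc : List Char × List Char) c =>
        if PySem.Chars.isdigit c then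
          if PySem.Int.mod ((PySem.Int.ofChars? [c]).getD 0) 2 == 0 then
            (acc.1 ++ PySem.Int.toChars (c.toNat : Int), acc.2)
          else acc
        else if PySem.Chars.isupper c then
          (acc.1, acc.2 ++ PySem.Int.toChars (c.toNat : Int))
        else acc)
      (ns, ls) = (ns ++ pvNum cs, ls ++ pvLet cs) := by
  induction cs generalizing ns ls with
  | nil => simp [pvNum, pvLet]
  | cons c cs ih =>
    by_cases hd : PySem.Chars.isdigit c = true
    · have hu := pvDigitNotUpper c hd
      by_cases he : (PySem.Int.mod ((PySem.Int.ofChars? [c]).getD 0) 2 == 0) = true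
      · rw [List.foldl_cons, if_pos hd, if_pos he, ih,
          pvNum_cons_even c cs hd he, pvLet_cons_nonupper c cs hu, List.append_assoc]
      · rw [List.foldl_cons, if_pos hd, if_neg he, ih,
          pvNum_cons_odd c cs hd he, pvLet_cons_nonupper c cs hu]
    · have hd' : PySem.Chars.isdigit c = false := by simpa using hd
      by_cases hu : PySem.Chars.isupper c = true
      · rw [List.foldl_cons, if_neg hd, if_pos hu, ih,
          pvNum_cons_nondigit c cs hd', pvLet_cons_upper c cs hu, List.append_assoc]
      · have hu' : PySem.Chars.isupper c = false := by simpa using hu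
        rw [List.foldl_cons, if_neg hd, if_neg hu, ih,
          pvNum_cons_nondigit c cs hd', pvLet_cons_nonupper c cs hu']

-- ===== VERDICT (by name: the statement is the Claim_ definition above) =====
theorem separate_and_convert_spec : Claim_equal_separate_and_convert := by
  intro s _
  unfold Spec_separate_and_convert separate_and_convert separate_and_convert_alt
  rw [pvLoopSpec]
  simp [pvNum, pvLet, List.map_map, Function.comp_def]
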